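-- pv_equiv track=rewrite | github.com/supasuge/GrizzHacks8CTF | Crypto/MicaliSchnorr/solve.py | enumerate_candidates
-- ===== SOURCE A (Python) =====
-- def enumerate_candidates(base_solution: int, basis: list[int]):
--     count = 1 << len(basis)
--     for mask in range(count):
--         candidate = base_solution
--         for i, vec in enumerate(basis):
--             if (mask >> i) & 1:
--                 candidate ^= vec
--         yield candidate
-- ===== SOURCE B (Python) =====
-- def enumerate_candidates(base_solution: int, basis: list[int]):
--     # subset-doubling: each basis vector doubles the candidate list in mask order
--     res = [base_solution]
--     for vec in basis:
--         res = res + [x ^ vec for x in res]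
--     yield from res
-- ===== Notes on version B (the rewrite author's own statement) =====
-- stated objective: faster
-- what changed: Replaces the per-mask inner loop over all basis vectors (recomputing each XOR combination from scratch) with subset doubling: the candidate list is doubled once per basis vector, producing the same mask-ordered sequence with one XOR per output element.
import Mathlib
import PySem

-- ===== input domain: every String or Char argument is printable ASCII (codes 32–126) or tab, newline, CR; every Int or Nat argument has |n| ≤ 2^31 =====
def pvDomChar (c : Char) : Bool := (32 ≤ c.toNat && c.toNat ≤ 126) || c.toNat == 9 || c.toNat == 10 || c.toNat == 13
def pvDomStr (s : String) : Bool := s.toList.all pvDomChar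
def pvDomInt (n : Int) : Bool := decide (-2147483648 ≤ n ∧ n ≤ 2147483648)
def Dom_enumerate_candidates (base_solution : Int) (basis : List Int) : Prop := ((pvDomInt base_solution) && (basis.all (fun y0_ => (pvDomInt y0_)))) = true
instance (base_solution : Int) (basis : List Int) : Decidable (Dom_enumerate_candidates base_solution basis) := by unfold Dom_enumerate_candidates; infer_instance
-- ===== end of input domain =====

-- B replaces A's per-mask inner scan of the whole basis by subset doubling (one XOR per new
-- element); same values in the same mask order. A is a generator; both ports return the list
-- of its yielded values.

-- ===== PORT A =====
-- literal port: for mask in range(1 << len(basis)): fold over enumerate(basis),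
-- XOR-ing vec in when (mask >> i) & 1 is truthy (≠ 0). enumerate indices are
-- nonnegative, so `iv.1.toNat` is exact for Python's `mask >> i`.
def enumerate_candidates (base_solution : Int) (basis : List Int) : List Int :=
  let count : Int := 1 <<< basis.length
  (PySem.List.pyRange 0 count).map (fun mask =>
    (PySem.List.enumerate basis).foldl
      (fun candidate iv =>
        if PySem.Int.band (mask >>> iv.1.toNat) 1 ≠ 0 then PySem.Int.bxor candidate iv.2
        else candidate)
      base_solution)

-- ===== PORT B =====
-- literal port of Source B: res = [base]; for vec in basis: res = res + [x ^ vec for x in res]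
def enumerate_candidates_alt (base_solution : Int) (basis : List Int) : List Int :=
  basis.foldl (fun res vec => res ++ res.map (fun x => PySem.Int.bxor x vec)) [base_solution]

-- ===== PRECONDITION & SPEC =====
def Spec_enumerate_candidates (base_solution : Int) (basis : List Int) (out : List Int) : Prop := out = enumerate_candidates_alt base_solution basis
instance (base_solution : Int) (basis : List Int) (out : List Int) : Decidable (Spec_enumerate_candidates base_solution basis out) := by unfold Spec_enumerate_candidates; infer_instance

-- ===== CLAIM (what is proved, stated in full; the proofs are below) =====
def Claim_equal_enumerate_candidates : Prop := ∀ (base_solution : Int) (basis : List Int), Dom_enumerate_candidates base_solution basis → Spec_enumerate_candidates base_solution basis (enumerate_candidates base_solution basis)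

-- ===== LEMMAS AND PROOFS =====

-- proof-side name for A's inner fold at a fixed mask M (definitionally A's inner lambda)
def pvG (basis : List Int) (M : Int) (base : Int) : Int :=
  (PySem.List.enumerate basis).foldl
    (fun candidate (iv : Int × Int) =>
      if PySem.Int.band (M >>> iv.1.toNat) 1 ≠ 0 then PySem.Int.bxor candidate iv.2
      else candidate)
    base

lemma pv_bit_low (s n k : Nat) (hs : s < n) : (2 ^ n + k) >>> s &&& 1 = k >>> s &&& 1 := by
  simp only [Nat.shiftRight_eq_div_pow, Nat.and_one_is_mod]
  have h1 : 2 ^ n = 2 ^ (n - s) * 2 ^ s := by rw [← pow_add]; congr 1; omega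
  obtain ⟨t, ht⟩ : ∃ t, 2 ^ (n - s) = 2 * t := ⟨2 ^ (n - s - 1), by rw [← pow_succ']; congr 1; omega⟩
  rw [h1, Nat.add_comm, Nat.add_mul_div_right _ _ (Nat.two_pow_pos s)]
  omega

lemma pv_bit_top (n k : Nat) (hk : k < 2 ^ n) : (2 ^ n + k) >>> n &&& 1 = 1 := by
  simp only [Nat.shiftRight_eq_div_pow, Nat.and_one_is_mod]
  rw [Nat.add_comm, Nat.add_div_right _ (Nat.two_pow_pos n), Nat.div_eq_of_lt hk]

lemma pv_bit_zero (n k : Nat) (hk : k < 2 ^ n) : k >>> n &&& 1 = 0 := by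
  simp only [Nat.shiftRight_eq_div_pow, Nat.and_one_is_mod]
  rw [Nat.div_eq_of_lt hk]

lemma pv_band_cast (m : Nat) : PySem.Int.band (↑m : Int) 1 = ↑(m &&& 1) := by
  have := PySem.Int.band_natCast m 1
  simpa using this

lemma pv_shift_cast (m s : Nat) : ((↑m : Int) >>> s) = ((↑(m >>> s)) : Int) := by simp

-- the inner fold only reads mask bits below the index range, so adding 2^n is invisible
lemma pv_fold_low (l : List Int) : ∀ (s : Nat) (c : Int) (n k : Nat), s + l.length ≤ n →
    (PySem.List.enumerate l ↑s).foldl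
      (fun candidate (iv : Int × Int) =>
        if PySem.Int.band ((↑(2 ^ n + k) : Int) >>> iv.1.toNat) 1 ≠ 0 then PySem.Int.bxor candidate iv.2
        else candidate) c
    = (PySem.List.enumerate l ↑s).foldl
      (fun candidate (iv : Int × Int) =>
        if PySem.Int.band ((↑k : Int) >>> iv.1.toNat) 1 ≠ 0 then PySem.Int.bxor candidate iv.2
        else candidate) c := by
  induction l with
  | nil => intro s c n k _; simp [PySem.List.enumerate]
  | cons x xs ih =>
    intro s c n k hle
    simp only [PySem.List.enumerate_cons, List.foldl_cons]
    have hs : s < n := by simp [List.length_cons] at hle; omega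
    have hcast : ((↑s : Int) + 1) = ((↑(s + 1) : Nat) : Int) := by push_cast; ring
    have hcond : PySem.Int.band ((↑(2 ^ n + k) : Int) >>> ((↑s : Int)).toNat) 1
               = PySem.Int.band ((↑k : Int) >>> ((↑s : Int)).toNat) 1 := by
      have h1 : ∀ m : Nat, ((↑m : Int) >>> ((↑s : Int)).toNat) = ((↑(m >>> s)) : Int) := fun m => by simp
      rw [h1, h1, pv_band_cast, pv_band_cast, pv_bit_low s n k hs]
    simp only [hcond]
    rw [hcast]
    by_cases h : PySem.Int.band ((↑k : Int) >>> ((↑s : Int)).toNat) 1 ≠ 0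
    · simp only [if_pos h]; exact ih (s + 1) _ n k (by simp at hle ⊢; omega)
    · simp only [if_neg h]; exact ih (s + 1) _ n k (by simp at hle ⊢; omega)

lemma pvG_append (bs : List Int) (v M base : Int) :
    pvG (bs ++ [v]) M base =
      if PySem.Int.band (M >>> bs.length) 1 ≠ 0 then PySem.Int.bxor (pvG bs M base) v
      else pvG bs M base := by
  unfold pvG
  rw [PySem.List.enumerate_append, List.foldl_append]
  simp [PySem.List.enumerate]

lemma pv_main (basis : List Int) (base : Int) :
    List.map (fun k : Nat => pvG basis ((k : Int)) base) (List.range (2 ^ basis.length))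
      = enumerate_candidates_alt base basis := by
  induction basis using List.reverseRecOn with
  | nil => simp [pvG, enumerate_candidates_alt, PySem.List.enumerate, List.range_one]
  | append_singleton bs v ih =>
    have hlen : (bs ++ [v]).length = bs.length + 1 := by simp
    rw [hlen]
    have hsplit : List.range (2 ^ (bs.length + 1)) =
        List.range (2 ^ bs.length) ++ (List.range (2 ^ bs.length)).map (fun x => 2 ^ bs.length + x) := by
      rw [← List.range_add]; congr 1; ring
    rw [hsplit, List.map_append, List.map_map]
    have hRHS : enumerate_candidates_alt base (bs ++ [v]) =
        enumerate_candidates_alt base bs ++ (enumerate_candidates_alt base bs).map (fun x => PySem.Int.bxor x v) := by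
      unfold enumerate_candidates_alt
      rw [List.foldl_append]
      simp
    rw [hRHS, ← ih, List.map_map]
    congr 1
    · apply List.map_congr_left
      intro k hk
      rw [List.mem_range] at hk
      rw [pvG_append, pv_shift_cast, pv_band_cast, pv_bit_zero bs.length k hk]
      simp
    · apply List.map_congr_left
      intro k hk
      rw [List.mem_range] at hk
      simp only [Function.comp_apply]
      rw [pvG_append, pv_shift_cast, pv_band_cast, pv_bit_top bs.length k hk]
      have hlow : pvG bs ↑(2 ^ bs.length + k) base = pvG bs ↑k base := by
        have := pv_fold_low bs 0 base bs.length k (by omega)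
        simpa [pvG] using this
      rw [hlow]
      simp

-- ===== VERDICT (by name: the statement is the Claim_ definition above) =====
theorem enumerate_candidates_spec : Claim_equal_enumerate_candidates := by
  intro base basis _
  unfold Spec_enumerate_candidates
  have hA : enumerate_candidates base basis
      = (PySem.List.pyRange 0 (((1 <<< basis.length : Nat) : Int))).map (fun mask => pvG basis mask base) := rfl
  rw [hA, show ((1 <<< basis.length : Nat)) = (2 ^ basis.length : Nat) from Nat.one_shiftLeft _,
      PySem.List.pyRange_zero_nat, List.map_map]
  exact pv_main basis base
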